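-- pv_equiv track=rewrite | github.com/diannescotland/MATRIX | backend/api_server.py | distribute_contacts
-- ===== SOURCE A (Python) =====
-- from typing import Dict, Any, Optional, List, Tuple, Set
--
-- def distribute_contacts(contacts: List[Dict], accounts: List[str]) -> List[Tuple[str, List[Dict]]]:
--     """
--     Distribute contacts into equal chunks across accounts.
--
--     Args:
--         contacts: List of contact entries
--         accounts: List of account phone numbers
--
--     Returns:
--         List of tuples: (account_phone, contact_chunk)
--     """
--     total_contacts = len(contacts)
--     num_accounts = len(accounts)
--
--     if num_accounts == 0:
--         return []
--
--     chunk_size = total_contacts // num_accounts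
--     remainder = total_contacts % num_accounts
--
--     chunks = []
--     start_idx = 0
--
--     for i, account in enumerate(accounts):
--         # Distribute remainder across first accounts
--         size = chunk_size + (1 if i < remainder else 0)
--         end_idx = start_idx + size
--         chunks.append((account, contacts[start_idx:end_idx]))
--         start_idx = end_idx
--
--     return chunks
-- ===== SOURCE B (Python) =====
-- from typing import Dict, List, Tuple
--
-- def distribute_contacts(contacts: List[Dict], accounts: List[str]) -> List[Tuple[str, List[Dict]]]:
--     chunks = []
--     remaining = contacts
--     left = len(accounts)
--     for account in accounts:
--         k = -(-len(remaining) // left)   # ceil-divide what is left among the accounts left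
--         chunks.append((account, remaining[:k]))
--         remaining = remaining[k:]
--         left -= 1
--     return chunks
-- ===== Notes on version B (the rewrite author's own statement) =====
-- stated objective: alternative
-- what changed: Instead of precomputing chunk_size and remainder and slicing by indices, B peels the contacts list account by account, each step taking ceil(len(remaining)/accounts_left) elements from the front; there is no global quotient/remainder and no index arithmetic.
import Mathlib
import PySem

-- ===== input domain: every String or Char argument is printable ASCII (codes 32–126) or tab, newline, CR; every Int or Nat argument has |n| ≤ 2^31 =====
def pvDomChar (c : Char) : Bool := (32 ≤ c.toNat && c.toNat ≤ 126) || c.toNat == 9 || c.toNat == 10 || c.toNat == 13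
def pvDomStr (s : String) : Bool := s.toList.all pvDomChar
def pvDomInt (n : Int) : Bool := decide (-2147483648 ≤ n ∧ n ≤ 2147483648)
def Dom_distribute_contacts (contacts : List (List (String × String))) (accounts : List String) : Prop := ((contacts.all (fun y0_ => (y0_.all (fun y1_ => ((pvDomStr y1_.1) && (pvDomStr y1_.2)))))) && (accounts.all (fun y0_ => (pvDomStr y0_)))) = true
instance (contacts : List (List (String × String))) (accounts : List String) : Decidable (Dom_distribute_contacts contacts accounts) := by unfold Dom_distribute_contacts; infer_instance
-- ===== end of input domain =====

-- B drops A's global chunk_size/remainder and index arithmetic: it peels the contacts list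
-- account by account, taking ceil(len(remaining)/accounts_left) from the front each step
-- (alternative decomposition, same result, not claimed faster).

-- ===== PORT A =====
-- the for-loop of A: state is the running start_idx; each step appends one (account, slice) pair
def pvLoopA (cs : List (List (String × String))) (q r : Int) :
    List (Int × String) → Int → List (String × (List (List (String × String))))
  | [], _ => []
  | (i, a) :: rest, start =>
      let size := q + (if i < r then 1 else 0)
      let endi := start + size
      (a, PySem.List.slice cs (some start) (some endi)) :: pvLoopA cs q r rest endi

def distribute_contacts (contacts : List (List (String × String))) (accounts : List String) : List (String × (List (List (String × String)))) :=
  let total : Int := contacts.length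
  let num : Int := accounts.length
  if num == 0 then []
  else
    let chunk_size := PySem.Int.floordiv total num
    let remainder := PySem.Int.mod total num
    pvLoopA contacts chunk_size remainder (PySem.List.enumerate accounts 0) 0

-- ===== PORT B =====
-- B's for-loop: state is (remaining contacts, accounts left); each step takes
-- k = -(-len(remaining) // left) elements off the front of remaining
def pvLoopB : List String → List (List (String × String)) → Int → List (String × (List (List (String × String))))
  | [], _, _ => []
  | account :: rest, remaining, left =>
      let k := -(PySem.Int.floordiv (-(remaining.length : Int)) left)
      (account, PySem.List.slice remaining none (some k)) ::
        pvLoopB rest (PySem.List.slice remaining (some k) none) (left - 1)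

def distribute_contacts_alt (contacts : List (List (String × String))) (accounts : List String) : List (String × (List (List (String × String)))) :=
  pvLoopB accounts contacts (accounts.length : Int)

-- ===== PRECONDITION & SPEC =====
def Spec_distribute_contacts (contacts : List (List (String × String))) (accounts : List String) (out : List (String × (List (List (String × String))))) : Prop := out = distribute_contacts_alt contacts accounts
instance (contacts : List (List (String × String))) (accounts : List String) (out : List (String × (List (List (String × String))))) : Decidable (Spec_distribute_contacts contacts accounts out) := by unfold Spec_distribute_contacts; infer_instance

-- ===== CLAIM (what is proved, stated in full; the proofs are below) =====
def Claim_equal_distribute_contacts : Prop := ∀ (contacts : List (List (String × String))) (accounts : List String), Dom_distribute_contacts contacts accounts → Spec_distribute_contacts contacts accounts (distribute_contacts contacts accounts)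

-- ===== LEMMAS AND PROOFS =====

-- invariant: after i accounts, A's cursor is at s = i*q + min i r and B's remaining list is
-- cs.drop s with left = n - i accounts to go; each step both emit the same chunk of size
-- q + (1 if i < r else 0)
theorem pvLoopA_eq_pvLoopB (cs : List (List (String × String))) (n q r : Int)
    (hn : 0 < n) (hq : q = PySem.Int.floordiv (cs.length : Int) n)
    (hr : r = PySem.Int.mod (cs.length : Int) n) :
    ∀ (l : List String) (i : Int), 0 ≤ i → i + l.length = n →
    pvLoopA cs q r (PySem.List.enumerate l i) (i * q + min i r) =
      pvLoopB l (cs.drop (i * q + min i r).toNat) (n - i) := by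
  have hrn : 0 ≤ r ∧ r < n := hr ▸ ⟨PySem.Int.mod_nonneg _ hn, PySem.Int.mod_lt _ hn⟩
  have hm : q * n + r = (cs.length : Int) := by
    rw [hq, hr]; exact PySem.Int.floordiv_mul_add_mod _ _
  have hq0 : 0 ≤ q := by
    by_contra h
    have : q * n ≤ -n := by nlinarith
    omega
  intro l
  induction l with
  | nil => intro i hi hlen; simp [PySem.List.enumerate_nil, pvLoopA, pvLoopB]
  | cons a rest ih =>
      intro i hi hlen
      simp only [List.length_cons] at hlen
      have hin : i < n := by omega
      rw [PySem.List.enumerate_cons]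
      simp only [pvLoopA, pvLoopB]
      set s := i * q + min i r with hs
      have hs0 : 0 ≤ s := by
        have : 0 ≤ min i r := le_min hi hrn.1
        positivity
      set c : Int := if i < r then 1 else 0 with hc
      have hsize0 : 0 ≤ q + c := by rcases lt_or_ge i r with h | h <;> simp [hc, h] <;> omega
      have hsm : s + (q + c) ≤ (cs.length : Int) := by
        rcases lt_or_ge i r with h | h
        · simp only [hc, if_pos h, hs, min_eq_left h.le]
          nlinarith
        · simp only [hc, if_neg (not_lt.mpr h), hs, min_eq_right h]
          nlinarith
      -- B's remaining length
      have hlenrem : ((cs.drop s.toNat).length : Int) = (cs.length : Int) - s := by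
        simp only [List.length_drop]
        omega
      -- B's k equals A's size q + c
      have hk : -(PySem.Int.floordiv (-(((cs.drop s.toNat).length : Int))) (n - i)) = q + c := by
        rw [hlenrem, PySem.Int.neg_floordiv_neg_eq_iff_of_pos (by omega : (0:Int) < n - i)]
        have hL : (cs.length : Int) - s = q * (n - i) + (r - min i r) := by
          rw [hs]; linarith [hm]
        rcases lt_or_ge i r with h | h
        · simp only [hc, if_pos h] at hL ⊢
          rw [min_eq_left h.le] at hL
          constructor <;> nlinarith
        · simp only [hc, if_neg (not_lt.mpr h)] at hL ⊢
          rw [min_eq_right h] at hL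
          constructor <;> nlinarith
      rw [hk]
      -- next cursor: s + (q + c) = (i+1)*q + min (i+1) r
      have hnext : s + (q + c) = (i + 1) * q + min (i + 1) r := by
        rcases lt_or_ge i r with h | h
        · simp only [hc, if_pos h, hs, min_eq_left h.le, min_eq_left (by omega : i + 1 ≤ r)]
          ring
        · simp only [hc, if_neg (not_lt.mpr h), hs, min_eq_right h,
            min_eq_right (by omega : r ≤ i + 1)]
          ring
      congr 1
      · -- same chunk
        congr 1
        rw [PySem.List.slice_toNat cs hs0 (by omega),
            PySem.List.slice_to _ hsize0]
        congr 1
        omega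
      · -- same tail
        rw [PySem.List.slice_from _ hsize0, List.drop_drop]
        have harg : s.toNat + (q + c).toNat = (s + (q + c)).toNat := by omega
        rw [harg, hnext]
        have h2 : n - i - 1 = n - (i + 1) := by ring
        rw [h2]
        exact ih (i + 1) (by omega) (by omega)

-- ===== VERDICT (by name: the statement is the Claim_ definition above) =====
theorem distribute_contacts_spec : Claim_equal_distribute_contacts := by
  intro contacts accounts _
  unfold Spec_distribute_contacts distribute_contacts distribute_contacts_alt
  cases accounts with
  | nil => simp [pvLoopB]
  | cons a rest =>
      have hn : (0 : Int) < ((a :: rest).length : Int) := by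
        simp only [List.length_cons]; positivity
      simp only [show (((a :: rest).length : Int) == 0) = false by
        simp only [beq_eq_false_iff_ne]; omega]
      have := pvLoopA_eq_pvLoopB contacts ((a :: rest).length : Int)
        (PySem.Int.floordiv (contacts.length : Int) ((a :: rest).length : Int))
        (PySem.Int.mod (contacts.length : Int) ((a :: rest).length : Int))
        hn rfl rfl (a :: rest) 0 le_rfl (by simp)
      simpa using this
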